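-- pv_equiv track=rewrite | github.com/MarcoFer23/Data_Analysis_Projects | Esercizi-Modulo-4/20230918_Epicode_Ex_5_M4.py | count_char_alpha_only
-- ===== SOURCE A (Python) =====
-- def count_char_alpha_only(racconto):
--     dizionario = {}
--     for x in racconto:
--         if str(x).isalpha():
--             if x not in dizionario.keys():
--                 dizionario.update({x:1})
--             elif x in dizionario.keys():
--                 dizionario[x] += 1
--     return dizionario
-- ===== SOURCE B (Python) =====
-- def count_char_alpha_only(racconto):
--     letters = [x for x in racconto if str(x).isalpha()]
--     return {c: letters.count(c) for c in dict.fromkeys(letters)}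
-- ===== Notes on version B (the rewrite author's own statement) =====
-- stated objective: idiomatic
-- what changed: Replaces the single-pass accumulating dict (membership test + insert-or-increment per character) with a declarative dict comprehension: filter the alphabetic characters once, then count each distinct character (first-occurrence order via dict.fromkeys) with list.count.
import Mathlib
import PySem

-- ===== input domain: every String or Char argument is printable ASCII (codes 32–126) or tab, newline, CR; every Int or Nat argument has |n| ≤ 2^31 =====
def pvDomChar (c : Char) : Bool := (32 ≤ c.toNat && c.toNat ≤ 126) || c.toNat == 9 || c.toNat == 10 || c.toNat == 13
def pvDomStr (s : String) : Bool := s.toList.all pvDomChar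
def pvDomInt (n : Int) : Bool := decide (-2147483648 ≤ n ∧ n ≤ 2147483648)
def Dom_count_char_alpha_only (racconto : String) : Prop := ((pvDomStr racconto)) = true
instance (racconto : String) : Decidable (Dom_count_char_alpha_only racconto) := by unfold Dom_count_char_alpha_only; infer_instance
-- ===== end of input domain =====

-- B replaces A's single-pass insert-or-increment dict loop by "filter the alphabetic
-- characters, then one (key, count) entry per distinct character" (idiomatic dict
-- comprehension); same return value, different structure.

-- ===== PORT A =====
def count_char_alpha_only (racconto : String) : List (String × Int) :=
  (racconto.toList.foldl (fun (dizionario : PySem.Dict String Int) x =>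
      if PySem.Str.isalpha x then
        if dizionario.contains (String.ofList [x]) = false then
          dizionario.insert (String.ofList [x]) 1
        else
          dizionario.insert (String.ofList [x]) (dizionario.getD (String.ofList [x]) 0 + 1)
      else dizionario) PySem.Dict.empty).items

-- ===== PORT B =====
def count_char_alpha_only_alt (racconto : String) : List (String × Int) :=
  let letters := (racconto.toList.filter (fun x => PySem.Str.isalpha x)).map (fun x => String.ofList [x])
  (PySem.List.dedup letters).map (fun c => (c, (letters.count c : Int)))

-- ===== PRECONDITION & SPEC =====
def Spec_count_char_alpha_only (racconto : String) (out : List (String × Int)) : Prop := out = count_char_alpha_only_alt racconto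
instance (racconto : String) (out : List (String × Int)) : Decidable (Spec_count_char_alpha_only racconto out) := by unfold Spec_count_char_alpha_only; infer_instance

-- ===== CLAIM (what is proved, stated in full; the proofs are below) =====
def Claim_equal_count_char_alpha_only : Prop := ∀ (racconto : String), Dom_count_char_alpha_only racconto → Spec_count_char_alpha_only racconto (count_char_alpha_only racconto)

-- ===== LEMMAS AND PROOFS =====

-- A's per-character update ("insert 1 if absent, else increment") is exactly
-- Counter's modify step.
theorem pv_step_eq (d : PySem.Dict String Int) (s : String) :
    (if d.contains s = false then d.insert s 1 else d.insert s (d.getD s 0 + 1))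
      = d.modify s 0 (· + 1) := by
  by_cases h : d.contains s
  · simp [h, PySem.Dict.modify]
  · have h0 : d.getD s 0 = 0 := by
      have hf : List.find? (fun p => p.1 == s) d.items = none := by
        rw [List.find?_eq_none]
        intro p hp hps
        exact h (by simp only [PySem.Dict.contains, List.any_eq_true]; exact ⟨p, hp, hps⟩)
      simp [PySem.Dict.getD, PySem.Dict.get?, hf]
    simp [h, h0, PySem.Dict.modify]

-- A's whole loop is the Counter fold over the filtered-and-stringified characters.
theorem pv_fold_eq (cs : List Char) (d : PySem.Dict String Int) :
    cs.foldl (fun (dizionario : PySem.Dict String Int) x =>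
      if PySem.Str.isalpha x then
        if dizionario.contains (String.ofList [x]) = false then
          dizionario.insert (String.ofList [x]) 1
        else
          dizionario.insert (String.ofList [x]) (dizionario.getD (String.ofList [x]) 0 + 1)
      else dizionario) d
      = ((cs.filter (fun x => PySem.Str.isalpha x)).map (fun x => String.ofList [x])).foldl
          (fun d x => d.modify x 0 (· + 1)) d := by
  induction cs generalizing d with
  | nil => rfl
  | cons c t ih =>
    by_cases h : PySem.Str.isalpha c
    · simpa [h, List.filter_cons, pv_step_eq] using ih _
    · simpa [h, List.filter_cons] using ih d


-- ===== VERDICT (by name: the statement is the Claim_ definition above) =====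
theorem count_char_alpha_only_spec : Claim_equal_count_char_alpha_only := by
  intro racconto _
  unfold Spec_count_char_alpha_only count_char_alpha_only count_char_alpha_only_alt
  rw [pv_fold_eq, ← PySem.Dict.counter_eq_foldl, PySem.Dict.items_counter]
  simp [PySem.List.dedup_eq_ofList]
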